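-- pv_equiv track=rewrite | github.com/pytorch/pytorch | .venv311/lib/python3.11/site-packages/networkx/generators/classic.py | _tree_edges
-- ===== SOURCE A (Python) =====
-- def _tree_edges(n, r):
--     if n == 0:
--         return
--     # helper function for trees
--     # yields edges in rooted tree at 0 with n nodes and branching ratio r
--     nodes = iter(range(n))
--     parents = [next(nodes)]  # stack of max length r
--     while parents:
--         source = parents.pop(0)
--         for i in range(r):
--             try:
--                 target = next(nodes)
--                 parents.append(target)
--                 yield source, target
--             except StopIteration:
--                 break
-- ===== SOURCE B (Python) =====
-- def _tree_edges(n, r):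
--     # closed form: in BFS numbering of an r-ary tree, node j's parent is (j-1)//r
--     if r < 1:
--         return
--     for j in range(1, n):
--         yield (j - 1) // r, j
-- ===== Notes on version B (the rewrite author's own statement) =====
-- stated objective: simpler
-- what changed: Replaces the queue-based BFS simulation (iterator over range(n), parents queue, nested try/except loop) with the closed-form parent formula: node j's parent in BFS numbering is (j-1)//r, so B just yields ((j-1)//r, j) for j in range(1, n) after guarding r < 1.
import Mathlib
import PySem

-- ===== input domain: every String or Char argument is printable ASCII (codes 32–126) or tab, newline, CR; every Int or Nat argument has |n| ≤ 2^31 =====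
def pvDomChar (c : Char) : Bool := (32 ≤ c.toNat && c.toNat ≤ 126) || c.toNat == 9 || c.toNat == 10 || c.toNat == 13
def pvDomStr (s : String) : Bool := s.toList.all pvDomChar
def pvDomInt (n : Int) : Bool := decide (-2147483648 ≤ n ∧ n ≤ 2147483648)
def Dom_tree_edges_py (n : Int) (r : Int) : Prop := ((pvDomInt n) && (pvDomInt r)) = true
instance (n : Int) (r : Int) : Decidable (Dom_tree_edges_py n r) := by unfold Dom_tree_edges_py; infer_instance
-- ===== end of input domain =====

-- B replaces A's queue-based BFS simulation by the closed-form parent formula (j-1)//r; objective: simpler.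


-- ===== PORT A =====
-- 'nodes = iter(range(n))' is modelled by its position: next() returns pos if pos < n (else StopIteration).
-- inner 'for i in range(r)' loop: consumes up to k values from the iterator, appending each to the
-- parents queue and yielding (source, target); returns (yielded edges, iterator position, parents queue)
def treeInnerA (s : Int) : Nat → Int → Int → List Int → List (List Int) × Int × List Int
  | 0, pos, _, parents => ([], pos, parents)
  | k + 1, pos, n, parents =>
    if pos < n then
      let res := treeInnerA s k (pos + 1) n (parents ++ [pos])
      ([s, pos] :: res.1, res.2)
    else ([], pos, parents)          -- StopIteration: break

-- measure invariant used only for termination of the while loop below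
theorem treeInnerA_meas (s : Int) : ∀ (k : Nat) (pos n : Int) (parents : List Int),
    (n - (treeInnerA s k pos n parents).2.1).toNat + (treeInnerA s k pos n parents).2.2.length
      = (n - pos).toNat + parents.length := by
  intro k
  induction k with
  | zero => intro pos n parents; simp [treeInnerA]
  | succ k ih =>
    intro pos n parents
    by_cases h : pos < n
    · simp only [treeInnerA, if_pos h, ih (pos + 1) n (parents ++ [pos])]
      simp; omega
    · simp [treeInnerA, if_neg h]

-- 'while parents:' loop
def treeLoopA (n r : Int) : Int → List Int → List (List Int)
  | _, [] => []
  | pos, source :: rest =>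
    let res := treeInnerA source r.toNat pos n rest
    res.1 ++ treeLoopA n r res.2.1 res.2.2
termination_by pos parents => (n - pos).toNat + parents.length
decreasing_by
  have h := treeInnerA_meas source r.toNat pos n rest
  simp at h ⊢; omega

def tree_edges_py (n : Int) (r : Int) : List (List Int) :=
  if n = 0 then []
  else if n < 0 then []   -- next() raises StopIteration → RuntimeError; excluded by Pre_
  else treeLoopA n r 1 [0]   -- parents = [next(nodes)] = [0], iterator at position 1

-- ===== PORT B =====
def tree_edges_py_alt (n : Int) (r : Int) : List (List Int) :=
  if r < 1 then []
  else (PySem.List.pyRange 1 n 1).map (fun j => [PySem.Int.floordiv (j - 1) r, j])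

-- ===== PRECONDITION & SPEC =====
-- Pre_ excludes n < 0, where A raises RuntimeError (next() on an exhausted iterator inside a generator).
def Pre_tree_edges_py (n : Int) (r : Int) : Prop := 0 ≤ n
instance (n : Int) (r : Int) : Decidable (Pre_tree_edges_py n r) := by unfold Pre_tree_edges_py; infer_instance
def pvWitness_tree_edges_py : Int × Int := (7, 2)

def Spec_tree_edges_py (n : Int) (r : Int) (out : List (List Int)) : Prop := out = tree_edges_py_alt n r
instance (n : Int) (r : Int) (out : List (List Int)) : Decidable (Spec_tree_edges_py n r out) := by unfold Spec_tree_edges_py; infer_instance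

-- ===== CLAIM (what is proved, stated in full; the proofs are below) =====
def Claim_equal_tree_edges_py : Prop := ∀ (n : Int) (r : Int), Dom_tree_edges_py n r → Pre_tree_edges_py n r → Spec_tree_edges_py n r (tree_edges_py n r)

-- ===== LEMMAS AND PROOFS =====

-- the inner loop from iterator position a (a ≤ n)
theorem treeInnerA_range (s : Int) : ∀ (k : Nat) (a n : Int) (ps : List Int), a ≤ n →
    treeInnerA s k a n ps =
      ((PySem.List.pyRange a (min (a + k) n) 1).map (fun t => [s, t]),
       min (a + (k:Int)) n,
       ps ++ PySem.List.pyRange a (min (a + k) n) 1) := by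
  intro k
  induction k with
  | zero =>
    intro a n ps ha
    have h : PySem.List.pyRange a (min a n) 1 = [] :=
      PySem.List.pyRange_one_eq_nil (min_le_left a n)
    have h2 : min a n = a := min_eq_left ha
    simp [treeInnerA, h, h2]
  | succ k ih =>
    intro a n ps ha
    by_cases hab : a < n
    · have hmin : a < min (a + ((k:Int) + 1)) n := by omega
      have hms : (PySem.List.pyRange a (min (a + ((k:Int)+1)) n) 1) =
          a :: PySem.List.pyRange (a + 1) (min (a + ((k:Int)+1)) n) 1 :=
        PySem.List.pyRange_one_cons hmin
      have he2 : a + 1 + (k:Int) = a + ((k:Int)+1) := by omega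
      simp only [treeInnerA, if_pos hab, ih (a + 1) n (ps ++ [a]) (by omega), he2]
      push_cast
      simp [hms]
    · have ha' : a = n := by omega
      have h2 : min (a + ((k:Int)+1)) n = a := by omega
      have h3 : PySem.List.pyRange a a 1 = [] := PySem.List.pyRange_one_eq_nil le_rfl
      simp only [treeInnerA, if_neg hab]
      push_cast
      rw [h2, h3]
      simp

-- split a range at q, clipped at n
theorem range_split (a q n : Int) (h : a ≤ q) :
    PySem.List.pyRange a n 1 = PySem.List.pyRange a (min q n) 1 ++ PySem.List.pyRange q n 1 := by
  rcases le_total n q with hn | hn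
  · have : PySem.List.pyRange q n 1 = [] := PySem.List.pyRange_one_eq_nil hn
    simp [this, min_eq_right hn]
  · rw [min_eq_left hn]
    exact PySem.List.pyRange_one_append a q n h hn

-- merge two adjacent clipped ranges
theorem range_merge (p q q' n : Int) (h1 : p ≤ q) (h2 : q ≤ q') :
    PySem.List.pyRange p (min q n) 1 ++ PySem.List.pyRange q (min q' n) 1
      = PySem.List.pyRange p (min q' n) 1 := by
  rcases le_total n q with hn | hn
  · have e4 : PySem.List.pyRange q n 1 = [] := PySem.List.pyRange_one_eq_nil hn
    have e3 : min q' n = n := by omega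
    rw [min_eq_right hn, e3, e4]
    simp
  · rw [min_eq_left hn]
    exact (PySem.List.pyRange_one_append p q (min q' n) h1 (by omega)).symm

-- a block starting at a clipped position equals the block starting at the unclipped one
theorem range_clip (q n rr : Int) (h : 0 ≤ rr) :
    PySem.List.pyRange (min q n) (min (q + rr) n) 1 = PySem.List.pyRange q (min (q + rr) n) 1 := by
  rcases le_total q n with hq | hq
  · rw [min_eq_left hq]
  · have e1 : min q n = n := min_eq_right hq
    have e2 : min (q + rr) n = n := by omega
    rw [e1, e2, PySem.List.pyRange_one_eq_nil le_rfl, PySem.List.pyRange_one_eq_nil hq]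

-- main invariant: after popping parents 0..p-1, the queue is p..min(r*p+1,n)-1, the iterator
-- is at min(r*p+1,n), and the loop emits exactly B's edges for targets ≥ r*p+1
theorem treeLoopA_inv (n r : Int) (hr : 1 ≤ r) : ∀ (m : Nat) (p : Int), 0 ≤ p → (n - p).toNat ≤ m →
    treeLoopA n r (min (r*p+1) n) (PySem.List.pyRange p (min (r*p+1) n) 1)
      = (PySem.List.pyRange (r*p+1) n 1).map (fun j => [PySem.Int.floordiv (j-1) r, j]) := by
  intro m
  induction m with
  | zero =>
    intro p hp hm
    have hnp : n ≤ p := by omega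
    have hrp : p ≤ r * p := le_mul_of_one_le_left hp hr
    have h1 : PySem.List.pyRange (r*p+1) n 1 = [] :=
      PySem.List.pyRange_one_eq_nil (by omega)
    have h2 : PySem.List.pyRange p (min (r*p+1) n) 1 = [] :=
      PySem.List.pyRange_one_eq_nil (by omega)
    simp [h1, h2, treeLoopA]
  | succ m ih =>
    intro p hp hm
    have hrp : p ≤ r * p := le_mul_of_one_le_left hp hr
    by_cases hpn : n ≤ p
    · have h1 : PySem.List.pyRange (r*p+1) n 1 = [] :=
        PySem.List.pyRange_one_eq_nil (by omega)
      have h2 : PySem.List.pyRange p (min (r*p+1) n) 1 = [] :=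
        PySem.List.pyRange_one_eq_nil (by omega)
      simp [h1, h2, treeLoopA]
    · -- p < n : pop p, consume its (up to r) children
      have hpn' : p < n := by omega
      have hq : p < min (r*p+1) n := by omega
      rw [PySem.List.pyRange_one_cons hq]
      have hrnat : ((r.toNat : Int)) = r := Int.toNat_of_nonneg (by omega)
      rw [treeLoopA]
      rw [treeInnerA_range p r.toNat (min (r*p+1) n) n
            (PySem.List.pyRange (p+1) (min (r*p+1) n) 1) (min_le_right _ _)]
      rw [hrnat]
      have emin : min (min (r*p+1) n + r) n = min (r*p+1+r) n := by omega
      have e1 : r*p+1+r = r*(p+1)+1 := by ring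
      have eclip : PySem.List.pyRange (min (r*p+1) n) (min (r*p+1+r) n) 1
          = PySem.List.pyRange (r*p+1) (min (r*p+1+r) n) 1 := by
        have := range_clip (r*p+1) n r (by omega)
        simpa [emin] using this
      rw [emin, eclip]
      have emrg : PySem.List.pyRange (p+1) (min (r*p+1) n) 1 ++
            PySem.List.pyRange (r*p+1) (min (r*(p+1)+1) n) 1
          = PySem.List.pyRange (p+1) (min (r*(p+1)+1) n) 1 := by
        have hc : r*(p+1) = r*p + r := by ring
        exact range_merge (p+1) (r*p+1) (r*(p+1)+1) n (by omega) (by omega)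
      simp only [e1]
      rw [emrg]
      have ihres := ih (p+1) (by omega) (by omega)
      rw [ihres]
      -- the popped node's edges match B's formula on its children block
      have hmap : (PySem.List.pyRange (r*p+1) (min (r*(p+1)+1) n) 1).map (fun t => [p, t])
          = (PySem.List.pyRange (r*p+1) (min (r*(p+1)+1) n) 1).map
              (fun j => [PySem.Int.floordiv (j-1) r, j]) := by
        apply List.map_congr_left
        intro t ht
        have hb := (PySem.List.mem_pyRange_one).1 ht
        have hc3 : r * (p+1) = r*p + r := by ring
        have hfd : PySem.Int.floordiv (t-1) r = p := by
          rw [PySem.Int.floordiv_eq_iff_of_pos (by omega)]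
          have hc1 : p * r = r * p := mul_comm p r
          have hc2 : (p+1) * r = r * (p+1) := mul_comm _ _
          omega
        rw [hfd]
      rw [hmap, ← List.map_append,
          ← range_split (r*p+1) (r*(p+1)+1) n (by nlinarith)]

-- ===== VERDICT (by name: the statement is the Claim_ definition above) =====
theorem tree_edges_py_spec : Claim_equal_tree_edges_py := by
  intro n r _ hpre
  unfold Spec_tree_edges_py tree_edges_py tree_edges_py_alt
  have hpre' : (0:Int) ≤ n := hpre
  by_cases hn : n = 0
  · subst hn
    have : PySem.List.pyRange 1 0 1 = [] := PySem.List.pyRange_one_eq_nil (by omega)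
    simp [this]
  · have hn' : 0 < n := by omega
    rw [if_neg hn, if_neg (by omega : ¬ n < 0)]
    by_cases hr : r < 1
    · -- range(r) is empty: the root is popped, nothing is yielded, the queue empties
      have hr0 : r.toNat = 0 := by omega
      simp [hr, treeLoopA, hr0, treeInnerA]
    · have hr1 : 1 ≤ r := by omega
      have key := treeLoopA_inv n r hr1 (n.toNat) 0 le_rfl (by omega)
      have e1 : r * 0 + 1 = (1:Int) := by ring
      rw [e1] at key
      have e2 : min (1:Int) n = 1 := by omega
      have e3 : PySem.List.pyRange 0 1 1 = [0] := by
        rw [PySem.List.pyRange_one_cons (by norm_num)]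
        simp [PySem.List.pyRange_one_eq_nil (le_refl (1:Int))]
      rw [e2, e3] at key
      rw [if_neg hr]
      exact key
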